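-- pv_equiv track=rewrite | github.com/joao-pamper/python-projects-cmput174 | Lab 7/simcity4.py | find_neighbor_values
-- ===== SOURCE A (Python) =====
-- def find_neighbor_values(grid: list[list[int]], row: int, col: int) -> list[int]:
--     """
--     Find the neighbors of a cell
--     """
--     max_row = len(grid) - 1
--     max_col = len(grid[0]) - 1
--     neighbours = []
--     for r in range(max_row + 1):
--             #check if row is possible
--             if r == row -1 or r == row or r == row +1:
--                 for c in range(max_col + 1):
--                     if c == col - 1 or c == col + 1:
--                         neighbours.append(int(grid[r][c]))
--                     elif c == col and r != row:
--                         neighbours.append(int(grid[r][c]))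
--     return neighbours
-- ===== SOURCE B (Python) =====
-- def find_neighbor_values(grid: list[list[int]], row: int, col: int) -> list[int]:
--     """
--     Find the neighbors of a cell
--     """
--     rows = len(grid)
--     cols = len(grid[0])
--     values = []
--     for r, c in ((row - 1, col - 1), (row - 1, col), (row - 1, col + 1),
--                  (row, col - 1), (row, col + 1),
--                  (row + 1, col - 1), (row + 1, col), (row + 1, col + 1)):
--         if 0 <= r < rows and 0 <= c < cols:
--             values.append(grid[r][c])
--     return values
-- ===== Notes on version B (the rewrite author's own statement) =====
-- stated objective: alternative
-- what changed: B indexes the 8 neighbor coordinates directly with bounds checks in row-major order instead of A's scan over every row index with an inner scan over every column index.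
import Mathlib
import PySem

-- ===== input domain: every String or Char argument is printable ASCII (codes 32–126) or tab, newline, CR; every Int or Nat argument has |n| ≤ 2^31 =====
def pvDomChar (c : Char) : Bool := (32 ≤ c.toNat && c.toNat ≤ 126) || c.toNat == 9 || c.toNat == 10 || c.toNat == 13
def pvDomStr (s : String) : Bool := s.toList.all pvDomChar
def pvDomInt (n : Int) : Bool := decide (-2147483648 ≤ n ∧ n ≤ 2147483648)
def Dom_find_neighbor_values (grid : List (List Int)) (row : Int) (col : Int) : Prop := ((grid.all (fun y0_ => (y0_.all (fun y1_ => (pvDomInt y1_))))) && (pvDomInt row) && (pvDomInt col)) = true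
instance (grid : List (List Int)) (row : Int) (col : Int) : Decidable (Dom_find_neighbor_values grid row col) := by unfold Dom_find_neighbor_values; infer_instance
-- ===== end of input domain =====

-- B replaces A's row-and-column index scan by direct bounds-checked indexing of the 8 neighbor
-- coordinates in row-major order (objective: alternative algorithm, same observed cost).

-- ===== PORT A =====
-- literal port of A: loop over every row index, band test, loop over every column index;
-- grid[0] and grid[r][c] are in range under Pre_ (pyGetD defaults are never reached there)
def find_neighbor_values (grid : List (List Int)) (row : Int) (col : Int) : List Int :=
  let max_row : Int := (grid.length : Int) - 1
  let max_col : Int := ((PySem.List.pyGetD grid 0 []).length : Int) - 1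
  (PySem.List.pyRange 0 (max_row + 1) 1).foldl (fun neighbours r =>
    if r = row - 1 ∨ r = row ∨ r = row + 1 then
      (PySem.List.pyRange 0 (max_col + 1) 1).foldl (fun neighbours c =>
        if c = col - 1 ∨ c = col + 1 then
          neighbours ++ [PySem.List.pyGetD (PySem.List.pyGetD grid r []) c 0]
        else if c = col ∧ r ≠ row then
          neighbours ++ [PySem.List.pyGetD (PySem.List.pyGetD grid r []) c 0]
        else neighbours) neighbours
    else neighbours) []

-- ===== PORT B =====
-- literal port of B: fold over the 8 neighbor coordinates with a bounds check
def find_neighbor_values_alt (grid : List (List Int)) (row : Int) (col : Int) : List Int :=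
  let rows : Int := (grid.length : Int)
  let cols : Int := ((PySem.List.pyGetD grid 0 []).length : Int)
  [(row - 1, col - 1), (row - 1, col), (row - 1, col + 1),
   (row, col - 1), (row, col + 1),
   (row + 1, col - 1), (row + 1, col), (row + 1, col + 1)].foldl (fun values rc =>
    if 0 ≤ rc.1 ∧ rc.1 < rows ∧ 0 ≤ rc.2 ∧ rc.2 < cols then
      values ++ [PySem.List.pyGetD (PySem.List.pyGetD grid rc.1 []) rc.2 0]
    else values) []

-- ===== PRECONDITION & SPEC =====
-- Pre_ = exactly the inputs where Python A returns: the grid is nonempty (A reads len(grid[0]))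
-- and every neighbor cell A actually visits exists in its (possibly ragged) row.
def Pre_find_neighbor_values (grid : List (List Int)) (row : Int) (col : Int) : Prop :=
  grid ≠ [] ∧ ∀ r ∈ List.range grid.length, ((r : Int) = row - 1 ∨ (r : Int) = row ∨ (r : Int) = row + 1) →
    ∀ c ∈ List.range (grid.headI.length), ((c : Int) = col - 1 ∨ (c : Int) = col + 1 ∨ ((c : Int) = col ∧ (r : Int) ≠ row)) →
      c < (grid.getD r []).length
instance (grid : List (List Int)) (row : Int) (col : Int) : Decidable (Pre_find_neighbor_values grid row col) := by unfold Pre_find_neighbor_values; infer_instance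
def pvWitness_find_neighbor_values : List (List Int) × Int × Int := ([[1, 2, 3], [4, 5, 6], [7, 8, 9]], 1, 1)

def Spec_find_neighbor_values (grid : List (List Int)) (row : Int) (col : Int) (out : List Int) : Prop := out = find_neighbor_values_alt grid row col
instance (grid : List (List Int)) (row : Int) (col : Int) (out : List Int) : Decidable (Spec_find_neighbor_values grid row col out) := by unfold Spec_find_neighbor_values; infer_instance

-- ===== CLAIM (what is proved, stated in full; the proofs are below) =====
def Claim_equal_find_neighbor_values : Prop := ∀ (grid : List (List Int)) (row : Int) (col : Int), Dom_find_neighbor_values grid row col → Pre_find_neighbor_values grid row col → Spec_find_neighbor_values grid row col (find_neighbor_values grid row col)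

-- ===== LEMMAS AND PROOFS =====

-- an append-style foldl is the accumulator followed by a flatMap
theorem foldl_push {α β : Type} (l : List α) (g : α → List β) (acc : List β) :
    l.foldl (fun a x => a ++ g x) acc = acc ++ l.flatMap g := by
  induction l generalizing acc <;> simp [*]

-- a flatMap over range(0, n) whose body is nonempty on at most {t-1, t, t+1}
theorem tri (n : Nat) (t : Int) (p : Int → Prop) [DecidablePred p] (F : Int → List Int) :
    (PySem.List.pyRange 0 (n : Int) 1).flatMap
      (fun r => if r = t - 1 ∨ r = t + 1 ∨ (r = t ∧ p r) then F r else []) =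
    (if 0 ≤ t - 1 ∧ t - 1 < (n : Int) then F (t - 1) else []) ++
    (if (0 ≤ t ∧ t < (n : Int)) ∧ p t then F t else []) ++
    (if 0 ≤ t + 1 ∧ t + 1 < (n : Int) then F (t + 1) else []) := by
  induction n with
  | zero =>
      have n1 : ¬(0 ≤ t - 1 ∧ t - 1 < ((0 : Nat) : Int)) := by omega
      have n2 : ¬((0 ≤ t ∧ t < ((0 : Nat) : Int)) ∧ p t) := fun h => absurd h.1.2 (by omega)
      have n3 : ¬(0 ≤ t + 1 ∧ t + 1 < ((0 : Nat) : Int)) := by omega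
      rw [PySem.List.pyRange_one_eq_nil (by omega), if_neg n1, if_neg n2, if_neg n3]
      simp
  | succ m ih =>
      have hc : ((m + 1 : Nat) : Int) = (m : Int) + 1 := by push_cast; ring
      rw [hc, PySem.List.pyRange_one_succ_right (by omega), List.flatMap_append, ih]
      simp only [List.flatMap_cons, List.flatMap_nil, List.append_nil]
      rcases eq_or_ne (m : Int) (t - 1) with h1 | h1
      · have hD : ((m : Int) = t - 1 ∨ (m : Int) = t + 1 ∨ ((m : Int) = t ∧ p (m : Int))) := Or.inl h1
        have e0 : F ((m : Int)) = F (t - 1) := by rw [h1]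
        have n1 : ¬(0 ≤ t - 1 ∧ t - 1 < (m : Int)) := by omega
        have n2 : ¬((0 ≤ t ∧ t < (m : Int)) ∧ p t) := fun h => absurd h.1.2 (by omega)
        have n2' : ¬((0 ≤ t ∧ t < (m : Int) + 1) ∧ p t) := fun h => absurd h.1.2 (by omega)
        have n3 : ¬(0 ≤ t + 1 ∧ t + 1 < (m : Int)) := by omega
        have n3' : ¬(0 ≤ t + 1 ∧ t + 1 < (m : Int) + 1) := by omega
        have p1 : 0 ≤ t - 1 ∧ t - 1 < (m : Int) + 1 := by omega
        rw [if_pos hD, if_pos p1, if_neg n1, if_neg n2, if_neg n2', if_neg n3, if_neg n3', e0]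
        simp
      rcases eq_or_ne (m : Int) t with h2 | h2
      · have c1 : (0 ≤ t - 1 ∧ t - 1 < (m : Int)) ↔ (0 ≤ t - 1 ∧ t - 1 < (m : Int) + 1) := by omega
        have n2 : ¬((0 ≤ t ∧ t < (m : Int)) ∧ p t) := fun h => absurd h.1.2 (by omega)
        have n3 : ¬(0 ≤ t + 1 ∧ t + 1 < (m : Int)) := by omega
        have n3' : ¬(0 ≤ t + 1 ∧ t + 1 < (m : Int) + 1) := by omega
        by_cases hp : p t
        · have hD : ((m : Int) = t - 1 ∨ (m : Int) = t + 1 ∨ ((m : Int) = t ∧ p (m : Int))) :=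
            Or.inr (Or.inr ⟨h2, by rw [h2]; exact hp⟩)
          have e0 : F ((m : Int)) = F t := by rw [h2]
          have p2 : (0 ≤ t ∧ t < (m : Int) + 1) ∧ p t := ⟨⟨by omega, by omega⟩, hp⟩
          rw [if_pos hD, if_congr c1 rfl rfl, if_pos p2, if_neg n2, if_neg n3, if_neg n3', e0]
          simp
        · have hD : ¬((m : Int) = t - 1 ∨ (m : Int) = t + 1 ∨ ((m : Int) = t ∧ p (m : Int))) := by
            rintro (h | h | ⟨h, hph⟩)
            · omega
            · omega
            · exact hp (h ▸ hph)
          have n2' : ¬((0 ≤ t ∧ t < (m : Int) + 1) ∧ p t) := fun h => hp h.2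
          rw [if_neg hD, if_congr c1 rfl rfl, if_neg n2, if_neg n2', if_neg n3, if_neg n3']
          simp
      rcases eq_or_ne (m : Int) (t + 1) with h3 | h3
      · have hD : ((m : Int) = t - 1 ∨ (m : Int) = t + 1 ∨ ((m : Int) = t ∧ p (m : Int))) :=
          Or.inr (Or.inl h3)
        have e0 : F ((m : Int)) = F (t + 1) := by rw [h3]
        have c1 : (0 ≤ t - 1 ∧ t - 1 < (m : Int)) ↔ (0 ≤ t - 1 ∧ t - 1 < (m : Int) + 1) := by omega
        have c2 : ((0 ≤ t ∧ t < (m : Int)) ∧ p t) ↔ ((0 ≤ t ∧ t < (m : Int) + 1) ∧ p t) := by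
          constructor <;> rintro ⟨h, hq⟩ <;> exact ⟨by omega, hq⟩
        have n3 : ¬(0 ≤ t + 1 ∧ t + 1 < (m : Int)) := by omega
        have p3 : 0 ≤ t + 1 ∧ t + 1 < (m : Int) + 1 := by omega
        rw [if_pos hD, if_congr c1 rfl rfl, if_congr c2 rfl rfl, if_neg n3, if_pos p3, e0]
        simp
      · have hD : ¬((m : Int) = t - 1 ∨ (m : Int) = t + 1 ∨ ((m : Int) = t ∧ p (m : Int))) := by
          rintro (h | h | ⟨h, -⟩) <;> omega
        have c1 : (0 ≤ t - 1 ∧ t - 1 < (m : Int)) ↔ (0 ≤ t - 1 ∧ t - 1 < (m : Int) + 1) := by omega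
        have c2 : ((0 ≤ t ∧ t < (m : Int)) ∧ p t) ↔ ((0 ≤ t ∧ t < (m : Int) + 1) ∧ p t) := by
          constructor <;> rintro ⟨h, hq⟩ <;> exact ⟨by omega, hq⟩
        have c3 : (0 ≤ t + 1 ∧ t + 1 < (m : Int)) ↔ (0 ≤ t + 1 ∧ t + 1 < (m : Int) + 1) := by omega
        rw [if_neg hD, if_congr c1 rfl rfl, if_congr c2 rfl rfl, if_congr c3 rfl rfl]
        simp

theorem if_cat3 (P : Prop) [Decidable P] (x y z : List Int) :
    (if P then x ++ y ++ z else []) = (if P then x else []) ++ (if P then y else []) ++ (if P then z else []) := by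
  split <;> simp

theorem if_if (P Q : Prop) [Decidable P] [Decidable Q] (x : List Int) :
    (if P then (if Q then x else []) else []) = (if P ∧ Q then x else []) := by
  by_cases hP : P <;> by_cases hQ : Q <;> simp [hP, hQ]

theorem tri2 (n : Nat) (t : Int) (F : Int → List Int) :
    (PySem.List.pyRange 0 (n : Int) 1).flatMap
      (fun r => if r = t - 1 ∨ r = t + 1 ∨ (r = t ∧ True) then F r else []) =
    (if 0 ≤ t - 1 ∧ t - 1 < (n : Int) then F (t - 1) else []) ++
    (if (0 ≤ t ∧ t < (n : Int)) ∧ True then F t else []) ++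
    (if 0 ≤ t + 1 ∧ t + 1 < (n : Int) then F (t + 1) else []) := tri n t (fun _ => True) F

theorem inner_eq (grid : List (List Int)) (row col : Int) (L : Nat) (rr : Int) (acc : List Int) :
    (PySem.List.pyRange 0 (L : Int) 1).foldl (fun ns c =>
        if c = col - 1 ∨ c = col + 1 then ns ++ [PySem.List.pyGetD (PySem.List.pyGetD grid rr []) c 0]
        else if c = col ∧ rr ≠ row then ns ++ [PySem.List.pyGetD (PySem.List.pyGetD grid rr []) c 0]
        else ns) acc
    = acc ++ ((if 0 ≤ col - 1 ∧ col - 1 < (L : Int) then [PySem.List.pyGetD (PySem.List.pyGetD grid rr []) (col - 1) 0] else []) ++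
        (if (0 ≤ col ∧ col < (L : Int)) ∧ rr ≠ row then [PySem.List.pyGetD (PySem.List.pyGetD grid rr []) col 0] else []) ++
        (if 0 ≤ col + 1 ∧ col + 1 < (L : Int) then [PySem.List.pyGetD (PySem.List.pyGetD grid rr []) (col + 1) 0] else [])) := by
  have hb : (fun (ns : List Int) (c : Int) =>
        if c = col - 1 ∨ c = col + 1 then ns ++ [PySem.List.pyGetD (PySem.List.pyGetD grid rr []) c 0]
        else if c = col ∧ rr ≠ row then ns ++ [PySem.List.pyGetD (PySem.List.pyGetD grid rr []) c 0]
        else ns)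
      = (fun ns c => ns ++ (if c = col - 1 ∨ c = col + 1 ∨ (c = col ∧ rr ≠ row) then [PySem.List.pyGetD (PySem.List.pyGetD grid rr []) c 0] else [])) := by
    funext ns c
    split_ifs <;> simp_all
  rw [hb, foldl_push]
  exact congrArg (acc ++ .) (tri L col (fun _ => rr ≠ row) (fun c => [PySem.List.pyGetD (PySem.List.pyGetD grid rr []) c 0]))

theorem main_eq (grid : List (List Int)) (row : Int) (col : Int) :
    find_neighbor_values grid row col = find_neighbor_values_alt grid row col := by
  simp only [find_neighbor_values, find_neighbor_values_alt]
  have hR : ((grid.length : Int) - 1) + 1 = (grid.length : Int) := by ring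
  have hL : (((PySem.List.pyGetD grid 0 []).length : Int) - 1) + 1 = ((PySem.List.pyGetD grid 0 []).length : Int) := by ring
  rw [hR, hL]
  have hout : (fun (ns : List Int) (r : Int) =>
        if r = row - 1 ∨ r = row ∨ r = row + 1 then
          List.foldl (fun ns c =>
              if c = col - 1 ∨ c = col + 1 then ns ++ [PySem.List.pyGetD (PySem.List.pyGetD grid r []) c 0]
              else if c = col ∧ r ≠ row then ns ++ [PySem.List.pyGetD (PySem.List.pyGetD grid r []) c 0]
              else ns) ns (PySem.List.pyRange 0 ((PySem.List.pyGetD grid 0 []).length : Int) 1)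
        else ns)
      = fun ns r => ns ++ (if r = row - 1 ∨ r = row + 1 ∨ (r = row ∧ True) then
          ((if 0 ≤ col - 1 ∧ col - 1 < ((PySem.List.pyGetD grid 0 []).length : Int) then [PySem.List.pyGetD (PySem.List.pyGetD grid r []) (col - 1) 0] else []) ++
           (if (0 ≤ col ∧ col < ((PySem.List.pyGetD grid 0 []).length : Int)) ∧ r ≠ row then [PySem.List.pyGetD (PySem.List.pyGetD grid r []) col 0] else []) ++
           (if 0 ≤ col + 1 ∧ col + 1 < ((PySem.List.pyGetD grid 0 []).length : Int) then [PySem.List.pyGetD (PySem.List.pyGetD grid r []) (col + 1) 0] else [])) else []) := by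
    funext ns r
    by_cases hb : r = row - 1 ∨ r = row ∨ r = row + 1
    · rw [if_pos hb, if_pos (by tauto), inner_eq]
    · rw [if_neg hb, if_neg (by tauto), List.append_nil]
  rw [hout, foldl_push, tri2 grid.length row (fun r => ((if 0 ≤ col - 1 ∧ col - 1 < ((PySem.List.pyGetD grid 0 []).length : Int) then [PySem.List.pyGetD (PySem.List.pyGetD grid r []) (col - 1) 0] else []) ++
           (if (0 ≤ col ∧ col < ((PySem.List.pyGetD grid 0 []).length : Int)) ∧ r ≠ row then [PySem.List.pyGetD (PySem.List.pyGetD grid r []) col 0] else []) ++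
           (if 0 ≤ col + 1 ∧ col + 1 < ((PySem.List.pyGetD grid 0 []).length : Int) then [PySem.List.pyGetD (PySem.List.pyGetD grid r []) (col + 1) 0] else [])))]
  have hbB : (fun (values : List Int) (rc : Int × Int) =>
        if 0 ≤ rc.1 ∧ rc.1 < (grid.length : Int) ∧ 0 ≤ rc.2 ∧ rc.2 < ((PySem.List.pyGetD grid 0 []).length : Int) then values ++ [PySem.List.pyGetD (PySem.List.pyGetD grid rc.1 []) rc.2 0] else values)
      = fun values rc => values ++ (if 0 ≤ rc.1 ∧ rc.1 < (grid.length : Int) ∧ 0 ≤ rc.2 ∧ rc.2 < ((PySem.List.pyGetD grid 0 []).length : Int) then [PySem.List.pyGetD (PySem.List.pyGetD grid rc.1 []) rc.2 0] else []) := by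
    funext values rc; split_ifs <;> simp
  rw [hbB, foldl_push]
  simp only [List.flatMap_cons, List.flatMap_nil, List.append_nil, List.nil_append]
  rw [if_cat3, if_cat3, if_cat3]
  simp only [if_if, and_true]
  have hmid : ¬((0 ≤ row ∧ row < (grid.length : Int)) ∧ (0 ≤ col ∧ col < ((PySem.List.pyGetD grid 0 []).length : Int)) ∧ row ≠ row) := fun h => h.2.2 rfl
  have e1 : (if (0 ≤ row - 1 ∧ row - 1 < (grid.length : Int)) ∧ 0 ≤ (col - 1) ∧ (col - 1) < ((PySem.List.pyGetD grid 0 []).length : Int) then [PySem.List.pyGetD (PySem.List.pyGetD grid (row - 1) []) (col - 1) 0] else []) = (if 0 ≤ row - 1 ∧ row - 1 < (grid.length : Int) ∧ 0 ≤ (col - 1) ∧ (col - 1) < ((PySem.List.pyGetD grid 0 []).length : Int) then [PySem.List.pyGetD (PySem.List.pyGetD grid (row - 1) []) (col - 1) 0] else []) := if_congr (by omega) rfl rfl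
  have e2 : (if (0 ≤ row - 1 ∧ row - 1 < (grid.length : Int)) ∧ (0 ≤ col ∧ col < ((PySem.List.pyGetD grid 0 []).length : Int)) ∧ row - 1 ≠ row then [PySem.List.pyGetD (PySem.List.pyGetD grid (row - 1) []) col 0] else []) = (if 0 ≤ row - 1 ∧ row - 1 < (grid.length : Int) ∧ 0 ≤ col ∧ col < ((PySem.List.pyGetD grid 0 []).length : Int) then [PySem.List.pyGetD (PySem.List.pyGetD grid (row - 1) []) col 0] else []) := if_congr (by omega) rfl rfl
  have e3 : (if (0 ≤ row - 1 ∧ row - 1 < (grid.length : Int)) ∧ 0 ≤ (col + 1) ∧ (col + 1) < ((PySem.List.pyGetD grid 0 []).length : Int) then [PySem.List.pyGetD (PySem.List.pyGetD grid (row - 1) []) (col + 1) 0] else []) = (if 0 ≤ row - 1 ∧ row - 1 < (grid.length : Int) ∧ 0 ≤ (col + 1) ∧ (col + 1) < ((PySem.List.pyGetD grid 0 []).length : Int) then [PySem.List.pyGetD (PySem.List.pyGetD grid (row - 1) []) (col + 1) 0] else []) := if_congr (by omega) rfl rfl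
  have e4 : (if (0 ≤ row ∧ row < (grid.length : Int)) ∧ 0 ≤ (col - 1) ∧ (col - 1) < ((PySem.List.pyGetD grid 0 []).length : Int) then [PySem.List.pyGetD (PySem.List.pyGetD grid (row) []) (col - 1) 0] else []) = (if 0 ≤ row ∧ row < (grid.length : Int) ∧ 0 ≤ (col - 1) ∧ (col - 1) < ((PySem.List.pyGetD grid 0 []).length : Int) then [PySem.List.pyGetD (PySem.List.pyGetD grid (row) []) (col - 1) 0] else []) := if_congr (by omega) rfl rfl
  have e5 : (if (0 ≤ row ∧ row < (grid.length : Int)) ∧ 0 ≤ (col + 1) ∧ (col + 1) < ((PySem.List.pyGetD grid 0 []).length : Int) then [PySem.List.pyGetD (PySem.List.pyGetD grid (row) []) (col + 1) 0] else []) = (if 0 ≤ row ∧ row < (grid.length : Int) ∧ 0 ≤ (col + 1) ∧ (col + 1) < ((PySem.List.pyGetD grid 0 []).length : Int) then [PySem.List.pyGetD (PySem.List.pyGetD grid (row) []) (col + 1) 0] else []) := if_congr (by omega) rfl rfl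
  have e6 : (if (0 ≤ row + 1 ∧ row + 1 < (grid.length : Int)) ∧ 0 ≤ (col - 1) ∧ (col - 1) < ((PySem.List.pyGetD grid 0 []).length : Int) then [PySem.List.pyGetD (PySem.List.pyGetD grid (row + 1) []) (col - 1) 0] else []) = (if 0 ≤ row + 1 ∧ row + 1 < (grid.length : Int) ∧ 0 ≤ (col - 1) ∧ (col - 1) < ((PySem.List.pyGetD grid 0 []).length : Int) then [PySem.List.pyGetD (PySem.List.pyGetD grid (row + 1) []) (col - 1) 0] else []) := if_congr (by omega) rfl rfl
  have e7 : (if (0 ≤ row + 1 ∧ row + 1 < (grid.length : Int)) ∧ (0 ≤ col ∧ col < ((PySem.List.pyGetD grid 0 []).length : Int)) ∧ row + 1 ≠ row then [PySem.List.pyGetD (PySem.List.pyGetD grid (row + 1) []) col 0] else []) = (if 0 ≤ row + 1 ∧ row + 1 < (grid.length : Int) ∧ 0 ≤ col ∧ col < ((PySem.List.pyGetD grid 0 []).length : Int) then [PySem.List.pyGetD (PySem.List.pyGetD grid (row + 1) []) col 0] else []) := if_congr (by omega) rfl rfl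
  have e8 : (if (0 ≤ row + 1 ∧ row + 1 < (grid.length : Int)) ∧ 0 ≤ (col + 1) ∧ (col + 1) < ((PySem.List.pyGetD grid 0 []).length : Int) then [PySem.List.pyGetD (PySem.List.pyGetD grid (row + 1) []) (col + 1) 0] else []) = (if 0 ≤ row + 1 ∧ row + 1 < (grid.length : Int) ∧ 0 ≤ (col + 1) ∧ (col + 1) < ((PySem.List.pyGetD grid 0 []).length : Int) then [PySem.List.pyGetD (PySem.List.pyGetD grid (row + 1) []) (col + 1) 0] else []) := if_congr (by omega) rfl rfl
  rw [if_neg hmid, e1, e2, e3, e4, e5, e6, e7, e8]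
  simp [List.append_assoc]

-- ===== VERDICT (by name: the statement is the Claim_ definition above) =====
theorem find_neighbor_values_spec : Claim_equal_find_neighbor_values := by
  intro grid row col _ _
  exact main_eq grid row col
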